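-- pv_equiv track=rewrite | github.com/gatorbacon/wrestledata-simple | scripts/team_resolver.py | search_teams
-- ===== SOURCE A (Python) =====
-- from typing import List, Dict
--
-- def search_teams(query: str, teams_by_name: Dict, external_teams: Dict) -> List[Dict]:
--     """Search for teams by name, abbreviation, state, or other attributes."""
--     query_lower = query.lower()
--     results = []
--
--     # Search NCAA teams
--     for exact_name, team_id in teams_by_name.items():
--         # Check full name
--         if query_lower in exact_name.lower():
--             # Get the exact name from the database
--             results.append({
--                 'name': exact_name,  # Preserve exact case from database
--                 'id': team_id,
--                 'source': 'NCAA',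
--                 'match_type': 'name'
--             })
--
--         # Check abbreviation in team_id
--         if query_lower in team_id.lower():
--             results.append({
--                 'name': exact_name,  # Preserve exact case from database
--                 'id': team_id,
--                 'source': 'NCAA',
--                 'match_type': 'abbreviation'
--             })
--
--     # Search external teams
--     for team_id, info in external_teams.items():
--         exact_name = info.get('name', '')
--         state = info.get('state', '')
--         division = info.get('division', '')
--         conference = info.get('conference', '')
--
--         # Check full name
--         if query_lower in exact_name.lower():
--             results.append({
--                 'name': exact_name,  # Preserve exact case from database
--                 'id': team_id,
--                 'source': 'External',
--                 'match_type': 'name',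
--                 'state': state,
--                 'division': division,
--                 'conference': conference
--             })
--
--         # Check abbreviation
--         if query_lower in team_id.lower():
--             results.append({
--                 'name': exact_name,  # Preserve exact case from database
--                 'id': team_id,
--                 'source': 'External',
--                 'match_type': 'abbreviation',
--                 'state': state,
--                 'division': division,
--                 'conference': conference
--             })
--
--         # Check state
--         if state and query_lower in state.lower():
--             results.append({
--                 'name': exact_name,  # Preserve exact case from database
--                 'id': team_id,
--                 'source': 'External',
--                 'match_type': 'state',
--                 'state': state,
--                 'division': division,
--                 'conference': conference
--             })
--
--     # Sort results by match type (name matches first, then abbreviation, then state)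
--     match_type_order = {'name': 0, 'abbreviation': 1, 'state': 2}
--     results.sort(key=lambda x: (match_type_order.get(x['match_type'], 3), x['name']))
--
--     return results
-- ===== SOURCE B (Python) =====
-- def search_teams(query, teams_by_name, external_teams):
--     """Collect matches per match_type (name, abbreviation, state) in three passes,
--     sort each group by name alone, and concatenate the groups."""
--     ql = query.lower()
--
--     def ncaa_entry(name, team_id, mt):
--         return {'name': name, 'id': team_id, 'source': 'NCAA', 'match_type': mt}
--
--     def ext_entry(team_id, info, mt):
--         return {'name': info.get('name', ''), 'id': team_id, 'source': 'External',
--                 'match_type': mt, 'state': info.get('state', ''),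
--                 'division': info.get('division', ''), 'conference': info.get('conference', '')}
--
--     name_hits = [ncaa_entry(n, t, 'name') for n, t in teams_by_name.items() if ql in n.lower()] \
--               + [ext_entry(t, i, 'name') for t, i in external_teams.items() if ql in i.get('name', '').lower()]
--     abbr_hits = [ncaa_entry(n, t, 'abbreviation') for n, t in teams_by_name.items() if ql in t.lower()] \
--               + [ext_entry(t, i, 'abbreviation') for t, i in external_teams.items() if ql in t.lower()]
--     state_hits = [ext_entry(t, i, 'state') for t, i in external_teams.items()
--                   if i.get('state', '') and ql in i.get('state', '').lower()]
--
--     by_name = lambda x: x['name']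
--     return sorted(name_hits, key=by_name) + sorted(abbr_hits, key=by_name) + sorted(state_hits, key=by_name)
-- ===== Notes on version B (the rewrite author's own statement) =====
-- stated objective: alternative
-- what changed: Instead of one interleaved scan emitting tagged entries followed by a stable sort on the composite key (match_type rank, name), B makes three separate passes (name, abbreviation, state matches), sorts each group by name alone, and concatenates the groups, dropping the match_type_order table and the composite key entirely.
import Mathlib
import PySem

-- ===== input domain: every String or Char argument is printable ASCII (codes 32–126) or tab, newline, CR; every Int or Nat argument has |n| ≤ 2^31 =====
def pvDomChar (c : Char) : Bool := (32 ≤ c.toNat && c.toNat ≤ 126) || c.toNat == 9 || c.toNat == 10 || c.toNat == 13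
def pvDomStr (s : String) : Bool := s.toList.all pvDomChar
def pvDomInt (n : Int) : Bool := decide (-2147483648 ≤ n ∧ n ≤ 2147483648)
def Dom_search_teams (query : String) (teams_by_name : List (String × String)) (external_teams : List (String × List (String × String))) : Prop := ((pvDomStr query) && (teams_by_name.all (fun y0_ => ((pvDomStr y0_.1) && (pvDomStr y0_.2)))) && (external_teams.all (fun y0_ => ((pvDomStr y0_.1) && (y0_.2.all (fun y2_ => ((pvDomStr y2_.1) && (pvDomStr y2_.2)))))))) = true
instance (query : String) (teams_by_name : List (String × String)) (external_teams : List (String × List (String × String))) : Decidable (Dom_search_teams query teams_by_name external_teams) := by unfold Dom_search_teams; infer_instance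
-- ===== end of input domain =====

-- B replaces A's single interleaved scan + stable sort on the composite key (match_type rank, name)
-- by three per-match-type passes, each group sorted by name alone and concatenated (objective: alternative).

-- ===== PORT A =====
-- the dict literal A appends for an NCAA match
def pvNcaaEntry (n tid mt : String) : List (String × String) :=
  [("name", n), ("id", tid), ("source", "NCAA"), ("match_type", mt)]
-- the dict literal A appends for an external match
def pvExtEntry (n tid mt st dv cf : String) : List (String × String) :=
  [("name", n), ("id", tid), ("source", "External"), ("match_type", mt), ("state", st), ("division", dv), ("conference", cf)]
-- x['k'] on a result entry; every entry carries the key, so getD's "" default is never used (exact here)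
def pvLookup (x : List (String × String)) (k : String) : String := (PySem.Dict.mk x).getD k ""
def pvMatchTypeOrder : PySem.Dict String Int := PySem.Dict.ofList [("name", 0), ("abbreviation", 1), ("state", 2)]

def search_teams (query : String) (teams_by_name : List (String × String)) (external_teams : List (String × List (String × String))) : List (List (String × String)) :=
  let query_lower := PySem.Str.lower query
  let results : List (List (String × String)) :=
    (PySem.Dict.ofList teams_by_name).items.foldl (fun results p =>
      let results := if PySem.Str.isIn query_lower (PySem.Str.lower p.1) then results ++ [pvNcaaEntry p.1 p.2 "name"] else results
      let results := if PySem.Str.isIn query_lower (PySem.Str.lower p.2) then results ++ [pvNcaaEntry p.1 p.2 "abbreviation"] else results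
      results) []
  let results :=
    (PySem.Dict.ofList external_teams).items.foldl (fun results p =>
      let info := PySem.Dict.ofList p.2
      let exact_name := info.getD "name" ""
      let state := info.getD "state" ""
      let division := info.getD "division" ""
      let conference := info.getD "conference" ""
      let results := if PySem.Str.isIn query_lower (PySem.Str.lower exact_name) then results ++ [pvExtEntry exact_name p.1 "name" state division conference] else results
      let results := if PySem.Str.isIn query_lower (PySem.Str.lower p.1) then results ++ [pvExtEntry exact_name p.1 "abbreviation" state division conference] else results
      let results := if !(state == "") && PySem.Str.isIn query_lower (PySem.Str.lower state) then results ++ [pvExtEntry exact_name p.1 "state" state division conference] else results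
      results) results
  PySem.List.sorted2 results (fun x => pvMatchTypeOrder.getD (pvLookup x "match_type") 3) (fun x => pvLookup x "name")

-- ===== PORT B =====
-- B's ncaa_entry helper
def pvNcaaEntryB (name team_id mt : String) : List (String × String) :=
  [("name", name), ("id", team_id), ("source", "NCAA"), ("match_type", mt)]
-- B's ext_entry helper
def pvExtEntryB (team_id : String) (info : PySem.Dict String String) (mt : String) : List (String × String) :=
  [("name", info.getD "name" ""), ("id", team_id), ("source", "External"), ("match_type", mt),
   ("state", info.getD "state" ""), ("division", info.getD "division" ""), ("conference", info.getD "conference" "")]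
-- B's x['name']; every entry carries the key, so getD's "" default is never used (exact here)
def pvLookupB (x : List (String × String)) (k : String) : String := (PySem.Dict.mk x).getD k ""

def search_teams_alt (query : String) (teams_by_name : List (String × String)) (external_teams : List (String × List (String × String))) : List (List (String × String)) :=
  let ql := PySem.Str.lower query
  let ncaa := (PySem.Dict.ofList teams_by_name).items
  let exts := (PySem.Dict.ofList external_teams).items
  let name_hits :=
    (ncaa.filter (fun p => PySem.Str.isIn ql (PySem.Str.lower p.1))).map (fun p => pvNcaaEntryB p.1 p.2 "name") ++
    (exts.filter (fun p => PySem.Str.isIn ql (PySem.Str.lower ((PySem.Dict.ofList p.2).getD "name" "")))).map (fun p => pvExtEntryB p.1 (PySem.Dict.ofList p.2) "name")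
  let abbr_hits :=
    (ncaa.filter (fun p => PySem.Str.isIn ql (PySem.Str.lower p.2))).map (fun p => pvNcaaEntryB p.1 p.2 "abbreviation") ++
    (exts.filter (fun p => PySem.Str.isIn ql (PySem.Str.lower p.1))).map (fun p => pvExtEntryB p.1 (PySem.Dict.ofList p.2) "abbreviation")
  let state_hits :=
    (exts.filter (fun p => !((PySem.Dict.ofList p.2).getD "state" "" == "") && PySem.Str.isIn ql (PySem.Str.lower ((PySem.Dict.ofList p.2).getD "state" "")))).map (fun p => pvExtEntryB p.1 (PySem.Dict.ofList p.2) "state")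
  let by_name := fun x => pvLookupB x "name"
  PySem.List.sorted name_hits by_name ++ PySem.List.sorted abbr_hits by_name ++ PySem.List.sorted state_hits by_name

-- ===== PRECONDITION & SPEC =====
def Spec_search_teams (query : String) (teams_by_name : List (String × String)) (external_teams : List (String × List (String × String))) (out : List (List (String × String))) : Prop := out = search_teams_alt query teams_by_name external_teams
instance (query : String) (teams_by_name : List (String × String)) (external_teams : List (String × List (String × String))) (out : List (List (String × String))) : Decidable (Spec_search_teams query teams_by_name external_teams out) := by unfold Spec_search_teams; infer_instance

-- ===== CLAIM (what is proved, stated in full; the proofs are below) =====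
def Claim_equal_search_teams : Prop := ∀ (query : String) (teams_by_name : List (String × String)) (external_teams : List (String × List (String × String))), Dom_search_teams query teams_by_name external_teams → Spec_search_teams query teams_by_name external_teams (search_teams query teams_by_name external_teams)

-- ===== LEMMAS AND PROOFS =====

-- the per-item contribution of A's NCAA loop
def pvGN (ql : String) (p : String × String) : List (List (String × String)) :=
  (if PySem.Str.isIn ql (PySem.Str.lower p.1) then [pvNcaaEntry p.1 p.2 "name"] else []) ++
  (if PySem.Str.isIn ql (PySem.Str.lower p.2) then [pvNcaaEntry p.1 p.2 "abbreviation"] else [])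

-- the per-item contribution of A's external loop
def pvGE (ql : String) (p : String × List (String × String)) : List (List (String × String)) :=
  let info := PySem.Dict.ofList p.2
  let n := info.getD "name" ""
  let st := info.getD "state" ""
  let dv := info.getD "division" ""
  let cf := info.getD "conference" ""
  (if PySem.Str.isIn ql (PySem.Str.lower n) then [pvExtEntry n p.1 "name" st dv cf] else []) ++
  (if PySem.Str.isIn ql (PySem.Str.lower p.1) then [pvExtEntry n p.1 "abbreviation" st dv cf] else []) ++
  (if !(st == "") && PySem.Str.isIn ql (PySem.Str.lower st) then [pvExtEntry n p.1 "state" st dv cf] else [])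

theorem pvFoldl_flat {α β : Type} (g : α → List β) (xs : List α) (init : List β) :
    xs.foldl (fun acc x => acc ++ g x) init = init ++ xs.flatMap g := by
  induction xs generalizing init with
  | nil => simp
  | cons a t ih => simp [ih, List.append_assoc]

theorem pvLookup_ncaa_mt (n t mt : String) : pvLookup (pvNcaaEntry n t mt) "match_type" = mt := rfl
theorem pvLookup_ext_mt (n t mt st dv cf : String) : pvLookup (pvExtEntry n t mt st dv cf) "match_type" = mt := rfl

theorem pvInsertBy_append_all_true {α : Type} (before : α → α → Bool) (x : α) (l r : List α)
    (hr : ∀ y ∈ r, before x y = true) :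
    PySem.List.insertBy before x (l ++ r) = PySem.List.insertBy before x l ++ r := by
  induction l with
  | nil =>
    cases r with
    | nil => simp [PySem.List.insertBy]
    | cons y ys => simp [PySem.List.insertBy, hr y (by simp)]
  | cons a l ih =>
    by_cases h : before x a <;> simp [PySem.List.insertBy, h, ih]

theorem pvInsertBy_append_all_false {α : Type} (before : α → α → Bool) (x : α) (l r : List α)
    (hl : ∀ y ∈ l, before x y = false) :
    PySem.List.insertBy before x (l ++ r) = l ++ PySem.List.insertBy before x r := by
  induction l with
  | nil => simp
  | cons a l ih =>
    have ha := hl a (by simp)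
    simp only [List.cons_append, PySem.List.insertBy, ha, Bool.false_eq_true, if_false]
    simp [ih (fun y hy => hl y (by simp [hy]))]

theorem pvInsertBy_congr {α : Type} (before before' : α → α → Bool) (x : α) (l : List α)
    (h : ∀ y ∈ l, before x y = before' x y) :
    PySem.List.insertBy before x l = PySem.List.insertBy before' x l := by
  induction l with
  | nil => rfl
  | cons a l ih =>
    have ha := h a (by simp)
    by_cases hb : before x a
    · simp [PySem.List.insertBy, hb, ha ▸ hb]
    · have hb' : before' x a = false := by rw [← ha]; simpa using hb
      have hbf : before x a = false := by simpa using hb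
      simp [PySem.List.insertBy, hbf, hb', ih (fun y hy => h y (by simp [hy]))]

theorem pvSorted2_group {α : Type} (k1 : α → Int) (k2 : α → String) (xs : List α)
    (h : ∀ x ∈ xs, k1 x = 0 ∨ k1 x = 1 ∨ k1 x = 2) :
    PySem.List.sorted2 xs k1 k2 =
      PySem.List.sorted (xs.filter (fun x => k1 x == 0)) k2 ++
      PySem.List.sorted (xs.filter (fun x => k1 x == 1)) k2 ++
      PySem.List.sorted (xs.filter (fun x => k1 x == 2)) k2 := by
  induction xs using List.reverseRecOn with
  | nil => simp [PySem.List.sorted2, PySem.List.sorted]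
  | append_singleton xs x ih =>
    have hxs : ∀ y ∈ xs, k1 y = 0 ∨ k1 y = 1 ∨ k1 y = 2 := fun y hy => h y (by simp [hy])
    have hx := h x (by simp)
    have hmem : ∀ (i : Int) (y : α),
        y ∈ PySem.List.sorted (xs.filter (fun z => k1 z == i)) k2 → k1 y = i := by
      intro i y hy
      rw [PySem.List.mem_sorted] at hy
      have := List.of_mem_filter hy
      simpa using this
    have e2 : PySem.List.sorted2 (xs ++ [x]) k1 k2 =
        PySem.List.insertBy (fun a b => decide (k1 a < k1 b) || (!decide (k1 b < k1 a) && decide (k2 a < k2 b))) x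
          (PySem.List.sorted2 xs k1 k2) := by
      simp [PySem.List.sorted2, List.foldl_append]
    have eS : ∀ (ys : List α), PySem.List.sorted (ys ++ [x]) k2 =
        PySem.List.insertBy (fun a b => decide (k2 a < k2 b)) x (PySem.List.sorted ys k2) := by
      intro ys; simp [PySem.List.sorted, List.foldl_append]
    have hfa0 : k1 x = 0 → (xs ++ [x]).filter (fun z => k1 z == 0) = xs.filter (fun z => k1 z == 0) ++ [x] := by
      intro h0; simp [List.filter_append, h0]
    have hfb0 : k1 x = 0 → (xs ++ [x]).filter (fun z => k1 z == 1) = xs.filter (fun z => k1 z == 1) := by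
      intro h0; simp [List.filter_append, h0]
    have hfc0 : k1 x = 0 → (xs ++ [x]).filter (fun z => k1 z == 2) = xs.filter (fun z => k1 z == 2) := by
      intro h0; simp [List.filter_append, h0]
    have hfa1 : k1 x = 1 → (xs ++ [x]).filter (fun z => k1 z == 0) = xs.filter (fun z => k1 z == 0) := by
      intro h1; simp [List.filter_append, h1]
    have hfb1 : k1 x = 1 → (xs ++ [x]).filter (fun z => k1 z == 1) = xs.filter (fun z => k1 z == 1) ++ [x] := by
      intro h1; simp [List.filter_append, h1]
    have hfc1 : k1 x = 1 → (xs ++ [x]).filter (fun z => k1 z == 2) = xs.filter (fun z => k1 z == 2) := by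
      intro h1; simp [List.filter_append, h1]
    have hfa2 : k1 x = 2 → (xs ++ [x]).filter (fun z => k1 z == 0) = xs.filter (fun z => k1 z == 0) := by
      intro h2; simp [List.filter_append, h2]
    have hfb2 : k1 x = 2 → (xs ++ [x]).filter (fun z => k1 z == 1) = xs.filter (fun z => k1 z == 1) := by
      intro h2; simp [List.filter_append, h2]
    have hfc2 : k1 x = 2 → (xs ++ [x]).filter (fun z => k1 z == 2) = xs.filter (fun z => k1 z == 2) ++ [x] := by
      intro h2; simp [List.filter_append, h2]
    rw [e2, ih hxs]
    rcases hx with h0 | h1 | h2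
    · rw [hfa0 h0, hfb0 h0, hfc0 h0, eS]
      conv_lhs => rw [List.append_assoc]
      rw [pvInsertBy_append_all_true _ x _ _ (by
        intro y hy
        rcases List.mem_append.1 hy with hy1 | hy2
        · have := hmem 1 y hy1; simp [h0, this]
        · have := hmem 2 y hy2; simp [h0, this])]
      rw [pvInsertBy_congr _ (fun a b => decide (k2 a < k2 b)) x _ (by
        intro y hy
        have := hmem 0 y hy; simp [h0, this])]
      rw [List.append_assoc]
    · rw [hfa1 h1, hfb1 h1, hfc1 h1, eS]
      rw [pvInsertBy_append_all_true _ x _ _ (by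
        intro y hy
        have := hmem 2 y hy; simp [h1, this])]
      rw [pvInsertBy_append_all_false _ x _ _ (by
        intro y hy
        have := hmem 0 y hy; simp [h1, this])]
      rw [pvInsertBy_congr _ (fun a b => decide (k2 a < k2 b)) x _ (by
        intro y hy
        have := hmem 1 y hy; simp [h1, this])]
    · rw [hfa2 h2, hfb2 h2, hfc2 h2, eS]
      rw [pvInsertBy_append_all_false _ x _ _ (by
        intro y hy
        rcases List.mem_append.1 hy with hy1 | hy2
        · have := hmem 0 y hy1; simp [h2, this]
        · have := hmem 1 y hy2; simp [h2, this])]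
      rw [pvInsertBy_congr _ (fun a b => decide (k2 a < k2 b)) x _ (by
        intro y hy
        have := hmem 2 y hy; simp [h2, this])]

-- A's NCAA loop is an append of per-item contributions
theorem pvFoldN (ql : String) (l : List (String × String)) (init : List (List (String × String))) :
    l.foldl (fun results p =>
      let results := if PySem.Str.isIn ql (PySem.Str.lower p.1) then results ++ [pvNcaaEntry p.1 p.2 "name"] else results
      let results := if PySem.Str.isIn ql (PySem.Str.lower p.2) then results ++ [pvNcaaEntry p.1 p.2 "abbreviation"] else results
      results) init = init ++ l.flatMap (pvGN ql) := by
  have e : (fun (results : List (List (String × String))) (p : String × String) =>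
      let results := if PySem.Str.isIn ql (PySem.Str.lower p.1) then results ++ [pvNcaaEntry p.1 p.2 "name"] else results
      let results := if PySem.Str.isIn ql (PySem.Str.lower p.2) then results ++ [pvNcaaEntry p.1 p.2 "abbreviation"] else results
      results) = fun results p => results ++ pvGN ql p := by
    funext results p
    by_cases h1 : PySem.Chars.isIn ql.toList (PySem.Chars.lower p.1.toList) <;>
      by_cases h2 : PySem.Chars.isIn ql.toList (PySem.Chars.lower p.2.toList) <;>
        simp [pvGN, h1, h2]
  rw [e, pvFoldl_flat]

-- A's external loop is an append of per-item contributions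
theorem pvFoldE (ql : String) (l : List (String × List (String × String))) (init : List (List (String × String))) :
    l.foldl (fun results p =>
      let info := PySem.Dict.ofList p.2
      let exact_name := info.getD "name" ""
      let state := info.getD "state" ""
      let division := info.getD "division" ""
      let conference := info.getD "conference" ""
      let results := if PySem.Str.isIn ql (PySem.Str.lower exact_name) then results ++ [pvExtEntry exact_name p.1 "name" state division conference] else results
      let results := if PySem.Str.isIn ql (PySem.Str.lower p.1) then results ++ [pvExtEntry exact_name p.1 "abbreviation" state division conference] else results
      let results := if !(state == "") && PySem.Str.isIn ql (PySem.Str.lower state) then results ++ [pvExtEntry exact_name p.1 "state" state division conference] else results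
      results) init = init ++ l.flatMap (pvGE ql) := by
  have e : (fun (results : List (List (String × String))) (p : String × List (String × String)) =>
      let info := PySem.Dict.ofList p.2
      let exact_name := info.getD "name" ""
      let state := info.getD "state" ""
      let division := info.getD "division" ""
      let conference := info.getD "conference" ""
      let results := if PySem.Str.isIn ql (PySem.Str.lower exact_name) then results ++ [pvExtEntry exact_name p.1 "name" state division conference] else results
      let results := if PySem.Str.isIn ql (PySem.Str.lower p.1) then results ++ [pvExtEntry exact_name p.1 "abbreviation" state division conference] else results
      let results := if !(state == "") && PySem.Str.isIn ql (PySem.Str.lower state) then results ++ [pvExtEntry exact_name p.1 "state" state division conference] else results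
      results) = fun results p => results ++ pvGE ql p := by
    funext results p
    by_cases h1 : PySem.Chars.isIn ql.toList (PySem.Chars.lower ((PySem.Dict.ofList p.2).getD "name" "").toList) <;>
      by_cases h2 : PySem.Chars.isIn ql.toList (PySem.Chars.lower p.1.toList) <;>
        by_cases h3 : (!((PySem.Dict.ofList p.2).getD "state" "" == "") && PySem.Chars.isIn ql.toList (PySem.Chars.lower ((PySem.Dict.ofList p.2).getD "state" "").toList)) <;>
          simp [pvGE, h1, h2, h3]
  rw [e, pvFoldl_flat]

-- filters of the NCAA contributions by match_type
theorem pvFilterN_name (ql : String) (l : List (String × String)) :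
    (l.flatMap (pvGN ql)).filter (fun x => pvLookup x "match_type" == "name") =
      (l.filter (fun p => PySem.Str.isIn ql (PySem.Str.lower p.1))).map (fun p => pvNcaaEntry p.1 p.2 "name") := by
  induction l with
  | nil => rfl
  | cons p t ih =>
    by_cases h1 : PySem.Chars.isIn ql.toList (PySem.Chars.lower p.1.toList) <;>
      by_cases h2 : PySem.Chars.isIn ql.toList (PySem.Chars.lower p.2.toList) <;>
        simp [pvGN, h1, h2, ih, pvLookup_ncaa_mt]

theorem pvFilterN_abbr (ql : String) (l : List (String × String)) :
    (l.flatMap (pvGN ql)).filter (fun x => pvLookup x "match_type" == "abbreviation") =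
      (l.filter (fun p => PySem.Str.isIn ql (PySem.Str.lower p.2))).map (fun p => pvNcaaEntry p.1 p.2 "abbreviation") := by
  induction l with
  | nil => rfl
  | cons p t ih =>
    by_cases h1 : PySem.Chars.isIn ql.toList (PySem.Chars.lower p.1.toList) <;>
      by_cases h2 : PySem.Chars.isIn ql.toList (PySem.Chars.lower p.2.toList) <;>
        simp [pvGN, h1, h2, ih, pvLookup_ncaa_mt]

theorem pvFilterN_state (ql : String) (l : List (String × String)) :
    (l.flatMap (pvGN ql)).filter (fun x => pvLookup x "match_type" == "state") = [] := by
  induction l with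
  | nil => rfl
  | cons p t ih =>
    by_cases h1 : PySem.Chars.isIn ql.toList (PySem.Chars.lower p.1.toList) <;>
      by_cases h2 : PySem.Chars.isIn ql.toList (PySem.Chars.lower p.2.toList) <;>
        simp [pvGN, h1, h2, ih, pvLookup_ncaa_mt]

-- filters of the external contributions by match_type
theorem pvFilterE_name (ql : String) (l : List (String × List (String × String))) :
    (l.flatMap (pvGE ql)).filter (fun x => pvLookup x "match_type" == "name") =
      (l.filter (fun p => PySem.Str.isIn ql (PySem.Str.lower ((PySem.Dict.ofList p.2).getD "name" "")))).map
        (fun p => pvExtEntry ((PySem.Dict.ofList p.2).getD "name" "") p.1 "name"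
          ((PySem.Dict.ofList p.2).getD "state" "") ((PySem.Dict.ofList p.2).getD "division" "") ((PySem.Dict.ofList p.2).getD "conference" "")) := by
  induction l with
  | nil => rfl
  | cons p t ih =>
    by_cases h1 : PySem.Chars.isIn ql.toList (PySem.Chars.lower ((PySem.Dict.ofList p.2).getD "name" "").toList) <;>
      by_cases h2 : PySem.Chars.isIn ql.toList (PySem.Chars.lower p.1.toList) <;>
        by_cases h3 : (!((PySem.Dict.ofList p.2).getD "state" "" == "") && PySem.Chars.isIn ql.toList (PySem.Chars.lower ((PySem.Dict.ofList p.2).getD "state" "").toList)) <;>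
          simp [pvGE, h1, h2, h3, ih, pvLookup_ext_mt]

theorem pvFilterE_abbr (ql : String) (l : List (String × List (String × String))) :
    (l.flatMap (pvGE ql)).filter (fun x => pvLookup x "match_type" == "abbreviation") =
      (l.filter (fun p => PySem.Str.isIn ql (PySem.Str.lower p.1))).map
        (fun p => pvExtEntry ((PySem.Dict.ofList p.2).getD "name" "") p.1 "abbreviation"
          ((PySem.Dict.ofList p.2).getD "state" "") ((PySem.Dict.ofList p.2).getD "division" "") ((PySem.Dict.ofList p.2).getD "conference" "")) := by
  induction l with
  | nil => rfl
  | cons p t ih =>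
    by_cases h1 : PySem.Chars.isIn ql.toList (PySem.Chars.lower ((PySem.Dict.ofList p.2).getD "name" "").toList) <;>
      by_cases h2 : PySem.Chars.isIn ql.toList (PySem.Chars.lower p.1.toList) <;>
        by_cases h3 : (!((PySem.Dict.ofList p.2).getD "state" "" == "") && PySem.Chars.isIn ql.toList (PySem.Chars.lower ((PySem.Dict.ofList p.2).getD "state" "").toList)) <;>
          simp [pvGE, h1, h2, h3, ih, pvLookup_ext_mt]

theorem pvFilterE_state (ql : String) (l : List (String × List (String × String))) :
    (l.flatMap (pvGE ql)).filter (fun x => pvLookup x "match_type" == "state") =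
      (l.filter (fun p => !((PySem.Dict.ofList p.2).getD "state" "" == "") && PySem.Str.isIn ql (PySem.Str.lower ((PySem.Dict.ofList p.2).getD "state" "")))).map
        (fun p => pvExtEntry ((PySem.Dict.ofList p.2).getD "name" "") p.1 "state"
          ((PySem.Dict.ofList p.2).getD "state" "") ((PySem.Dict.ofList p.2).getD "division" "") ((PySem.Dict.ofList p.2).getD "conference" "")) := by
  induction l with
  | nil => rfl
  | cons p t ih =>
    by_cases h1 : PySem.Chars.isIn ql.toList (PySem.Chars.lower ((PySem.Dict.ofList p.2).getD "name" "").toList) <;>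
      by_cases h2 : PySem.Chars.isIn ql.toList (PySem.Chars.lower p.1.toList) <;>
        by_cases h3 : (!((PySem.Dict.ofList p.2).getD "state" "" == "") && PySem.Chars.isIn ql.toList (PySem.Chars.lower ((PySem.Dict.ofList p.2).getD "state" "").toList)) <;>
          simp [pvGE, h1, h2, h3, ih, pvLookup_ext_mt]

-- every entry A collects carries one of the three match_type tags
theorem pvMem_mt (ql : String) (nl : List (String × String)) (el : List (String × List (String × String))) :
    ∀ x ∈ nl.flatMap (pvGN ql) ++ el.flatMap (pvGE ql),
      pvLookup x "match_type" = "name" ∨ pvLookup x "match_type" = "abbreviation" ∨ pvLookup x "match_type" = "state" := by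
  intro x hx
  rcases List.mem_append.1 hx with h | h
  · rcases List.mem_flatMap.1 h with ⟨p, _, hp⟩
    unfold pvGN at hp
    rcases List.mem_append.1 hp with h' | h' <;> split at h' <;> simp at h' <;> subst h' <;>
      simp [pvLookup_ncaa_mt]
  · rcases List.mem_flatMap.1 h with ⟨p, _, hp⟩
    unfold pvGE at hp
    simp only at hp
    rcases List.mem_append.1 hp with h' | h'
    · rcases List.mem_append.1 h' with h'' | h'' <;> split at h'' <;> simp at h'' <;> subst h'' <;>
        simp [pvLookup_ext_mt]
    · split at h' <;> simp at h' <;> subst h' <;> simp [pvLookup_ext_mt]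

-- characterization of A
theorem pvA_eq (query : String) (teams_by_name : List (String × String)) (external_teams : List (String × List (String × String))) :
    search_teams query teams_by_name external_teams =
      PySem.List.sorted2
        ((PySem.Dict.ofList teams_by_name).items.flatMap (pvGN (PySem.Str.lower query)) ++
         (PySem.Dict.ofList external_teams).items.flatMap (pvGE (PySem.Str.lower query)))
        (fun x => pvMatchTypeOrder.getD (pvLookup x "match_type") 3) (fun x => pvLookup x "name") := by
  have e : (PySem.Dict.ofList external_teams).items.foldl (fun results p =>
      let info := PySem.Dict.ofList p.2
      let exact_name := info.getD "name" ""
      let state := info.getD "state" ""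
      let division := info.getD "division" ""
      let conference := info.getD "conference" ""
      let results := if PySem.Str.isIn (PySem.Str.lower query) (PySem.Str.lower exact_name) then results ++ [pvExtEntry exact_name p.1 "name" state division conference] else results
      let results := if PySem.Str.isIn (PySem.Str.lower query) (PySem.Str.lower p.1) then results ++ [pvExtEntry exact_name p.1 "abbreviation" state division conference] else results
      let results := if !(state == "") && PySem.Str.isIn (PySem.Str.lower query) (PySem.Str.lower state) then results ++ [pvExtEntry exact_name p.1 "state" state division conference] else results
      results)
      ((PySem.Dict.ofList teams_by_name).items.foldl (fun results p =>
        let results := if PySem.Str.isIn (PySem.Str.lower query) (PySem.Str.lower p.1) then results ++ [pvNcaaEntry p.1 p.2 "name"] else results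
        let results := if PySem.Str.isIn (PySem.Str.lower query) (PySem.Str.lower p.2) then results ++ [pvNcaaEntry p.1 p.2 "abbreviation"] else results
        results) []) =
      (PySem.Dict.ofList teams_by_name).items.flatMap (pvGN (PySem.Str.lower query)) ++
      (PySem.Dict.ofList external_teams).items.flatMap (pvGE (PySem.Str.lower query)) := by
    rw [pvFoldE, pvFoldN]
    simp
  calc search_teams query teams_by_name external_teams
      = PySem.List.sorted2
          ((PySem.Dict.ofList external_teams).items.foldl (fun results p =>
            let info := PySem.Dict.ofList p.2
            let exact_name := info.getD "name" ""
            let state := info.getD "state" ""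
            let division := info.getD "division" ""
            let conference := info.getD "conference" ""
            let results := if PySem.Str.isIn (PySem.Str.lower query) (PySem.Str.lower exact_name) then results ++ [pvExtEntry exact_name p.1 "name" state division conference] else results
            let results := if PySem.Str.isIn (PySem.Str.lower query) (PySem.Str.lower p.1) then results ++ [pvExtEntry exact_name p.1 "abbreviation" state division conference] else results
            let results := if !(state == "") && PySem.Str.isIn (PySem.Str.lower query) (PySem.Str.lower state) then results ++ [pvExtEntry exact_name p.1 "state" state division conference] else results
            results)
            ((PySem.Dict.ofList teams_by_name).items.foldl (fun results p =>
              let results := if PySem.Str.isIn (PySem.Str.lower query) (PySem.Str.lower p.1) then results ++ [pvNcaaEntry p.1 p.2 "name"] else results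
              let results := if PySem.Str.isIn (PySem.Str.lower query) (PySem.Str.lower p.2) then results ++ [pvNcaaEntry p.1 p.2 "abbreviation"] else results
              results) []))
          (fun x => pvMatchTypeOrder.getD (pvLookup x "match_type") 3) (fun x => pvLookup x "name") := rfl
    _ = _ := by rw [e]

-- characterization of B
theorem pvB_eq (query : String) (teams_by_name : List (String × String)) (external_teams : List (String × List (String × String))) :
    search_teams_alt query teams_by_name external_teams =
      PySem.List.sorted
        ((((PySem.Dict.ofList teams_by_name).items.filter (fun p => PySem.Str.isIn (PySem.Str.lower query) (PySem.Str.lower p.1))).map (fun p => pvNcaaEntryB p.1 p.2 "name")) ++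
         (((PySem.Dict.ofList external_teams).items.filter (fun p => PySem.Str.isIn (PySem.Str.lower query) (PySem.Str.lower ((PySem.Dict.ofList p.2).getD "name" "")))).map (fun p => pvExtEntryB p.1 (PySem.Dict.ofList p.2) "name")))
        (fun x => pvLookupB x "name") ++
      PySem.List.sorted
        ((((PySem.Dict.ofList teams_by_name).items.filter (fun p => PySem.Str.isIn (PySem.Str.lower query) (PySem.Str.lower p.2))).map (fun p => pvNcaaEntryB p.1 p.2 "abbreviation")) ++
         (((PySem.Dict.ofList external_teams).items.filter (fun p => PySem.Str.isIn (PySem.Str.lower query) (PySem.Str.lower p.1))).map (fun p => pvExtEntryB p.1 (PySem.Dict.ofList p.2) "abbreviation")))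
        (fun x => pvLookupB x "name") ++
      PySem.List.sorted
        (((PySem.Dict.ofList external_teams).items.filter (fun p => !((PySem.Dict.ofList p.2).getD "state" "" == "") && PySem.Str.isIn (PySem.Str.lower query) (PySem.Str.lower ((PySem.Dict.ofList p.2).getD "state" "")))).map (fun p => pvExtEntryB p.1 (PySem.Dict.ofList p.2) "state"))
        (fun x => pvLookupB x "name") := rfl

theorem pvEntryB_ncaa (n t mt : String) : pvNcaaEntryB n t mt = pvNcaaEntry n t mt := rfl
theorem pvEntryB_ext (t : String) (l : List (String × String)) (mt : String) :
    pvExtEntryB t (PySem.Dict.ofList l) mt =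
      pvExtEntry ((PySem.Dict.ofList l).getD "name" "") t mt ((PySem.Dict.ofList l).getD "state" "")
        ((PySem.Dict.ofList l).getD "division" "") ((PySem.Dict.ofList l).getD "conference" "") := rfl
theorem pvLookupB_eq : pvLookupB = pvLookup := rfl

-- ===== VERDICT (by name: the statement is the Claim_ definition above) =====
theorem search_teams_spec : Claim_equal_search_teams := by
  intro query teams_by_name external_teams _
  unfold Spec_search_teams
  rw [pvA_eq, pvB_eq]
  set ql := PySem.Str.lower query with hql
  set nl := (PySem.Dict.ofList teams_by_name).items with hnl
  set el := (PySem.Dict.ofList external_teams).items with hel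
  set R := nl.flatMap (pvGN ql) ++ el.flatMap (pvGE ql) with hR
  have hmt := pvMem_mt ql nl el
  have hk : ∀ x ∈ R, (fun x => pvMatchTypeOrder.getD (pvLookup x "match_type") 3) x = 0 ∨
      (fun x => pvMatchTypeOrder.getD (pvLookup x "match_type") 3) x = 1 ∨
      (fun x => pvMatchTypeOrder.getD (pvLookup x "match_type") 3) x = 2 := by
    intro x hx
    rcases hmt x hx with h | h | h
    · exact Or.inl (by simp only [h, pvMatchTypeOrder]; decide)
    · exact Or.inr (Or.inl (by simp only [h, pvMatchTypeOrder]; decide))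
    · exact Or.inr (Or.inr (by simp only [h, pvMatchTypeOrder]; decide))
  rw [pvSorted2_group _ _ R hk]
  have hc0 : R.filter (fun x => pvMatchTypeOrder.getD (pvLookup x "match_type") 3 == 0) =
      R.filter (fun x => pvLookup x "match_type" == "name") := by
    apply List.filter_congr
    intro x hx
    rcases hmt x hx with h | h | h <;> simp only [h, pvMatchTypeOrder] <;> decide
  have hc1 : R.filter (fun x => pvMatchTypeOrder.getD (pvLookup x "match_type") 3 == 1) =
      R.filter (fun x => pvLookup x "match_type" == "abbreviation") := by
    apply List.filter_congr
    intro x hx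
    rcases hmt x hx with h | h | h <;> simp only [h, pvMatchTypeOrder] <;> decide
  have hc2 : R.filter (fun x => pvMatchTypeOrder.getD (pvLookup x "match_type") 3 == 2) =
      R.filter (fun x => pvLookup x "match_type" == "state") := by
    apply List.filter_congr
    intro x hx
    rcases hmt x hx with h | h | h <;> simp only [h, pvMatchTypeOrder] <;> decide
  rw [hc0, hc1, hc2, hR]
  simp only [List.filter_append]
  rw [pvFilterN_name, pvFilterE_name, pvFilterN_abbr, pvFilterE_abbr, pvFilterN_state, pvFilterE_state]
  simp [pvEntryB_ncaa, pvEntryB_ext, pvLookupB_eq]
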